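-- pv_equiv track=rewrite | github.com/abderrahmane02tahiri/RO-et-TDG | RO.py | find_max_positive
-- ===== SOURCE A (Python) =====
-- def find_max_positive(nums):
--     positive_nums = [num for num in nums if num > 0]
--     if positive_nums:
--         max_positive = max(positive_nums)
--         max_index = nums.index(max_positive)
--         return  max_index
--     else:
--         return  None
-- ===== SOURCE B (Python) =====
-- def find_max_positive(nums):
--     best_val = None
--     best_idx = None
--     for i, num in enumerate(nums):
--         if num > 0 and (best_val is None or num > best_val):
--             best_val = num
--             best_idx = i
--     return best_idx
-- ===== Notes on version B (the rewrite author's own statement) =====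
-- stated objective: alternative
-- what changed: Replaced the three-pass pipeline (build a filtered list, max() over it, nums.index() scan) by a single enumerate loop carrying best_val/best_idx with strict '>' so the first occurrence of the maximal positive is kept.
import Mathlib
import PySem

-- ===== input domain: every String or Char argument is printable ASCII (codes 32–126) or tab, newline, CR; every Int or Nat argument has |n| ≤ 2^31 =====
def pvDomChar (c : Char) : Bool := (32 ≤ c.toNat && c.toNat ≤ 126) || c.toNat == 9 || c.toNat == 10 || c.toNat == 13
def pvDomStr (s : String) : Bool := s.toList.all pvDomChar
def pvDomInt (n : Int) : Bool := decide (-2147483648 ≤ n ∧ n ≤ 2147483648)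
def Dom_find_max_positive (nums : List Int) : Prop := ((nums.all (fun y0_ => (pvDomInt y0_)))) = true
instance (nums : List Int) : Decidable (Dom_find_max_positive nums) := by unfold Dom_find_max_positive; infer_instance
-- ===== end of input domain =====

-- B replaces A's three passes (filter, max(), nums.index()) by one enumerate loop in O(1) extra
-- space keeping the first index of the running maximum positive (same asymptotic cost).


-- ===== PORT A =====
-- literal port of A: filter the positives, max() over them, nums.index() of that value
def find_max_positive (nums : List Int) : Option Int :=
  let positive_nums := nums.filter (fun num => decide (0 < num))
  if positive_nums ≠ [] then
    match PySem.List.max? positive_nums (fun x => x) with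
    | some max_positive => (PySem.List.index? nums max_positive).map (fun k => (k : Int))
    | none => none   -- unreachable: positive_nums ≠ []
  else
    none

-- ===== PORT B =====
-- literal port of B: one pass over enumerate(nums) carrying (best_val, best_idx)
def find_max_positive_alt (nums : List Int) : Option Int :=
  ((PySem.List.enumerate nums 0).foldl
    (fun (acc : Option Int × Option Int) p =>
      if 0 < p.2 && acc.1.all (fun v => decide (v < p.2)) then (some p.2, some p.1) else acc)
    (none, none)).2

-- ===== PRECONDITION & SPEC =====
def Spec_find_max_positive (nums : List Int) (out : Option Int) : Prop := out = find_max_positive_alt nums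
instance (nums : List Int) (out : Option Int) : Decidable (Spec_find_max_positive nums out) := by unfold Spec_find_max_positive; infer_instance

-- ===== CLAIM (what is proved, stated in full; the proofs are below) =====
def Claim_equal_find_max_positive : Prop := ∀ (nums : List Int), Dom_find_max_positive nums → Spec_find_max_positive nums (find_max_positive nums)

-- ===== LEMMAS AND PROOFS =====

-- proof-side reference: first index (and value) of the maximum element strictly above threshold t
def pvBest (l : List Int) (t : Int) : Option (Int × Nat) :=
  match l with
  | [] => none
  | x :: l' =>
    if t < x then
      some ((Option.map (fun r => (r.1, r.2 + 1)) (pvBest l' x)).getD (x, 0))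
    else
      Option.map (fun r => (r.1, r.2 + 1)) (pvBest l' t)

theorem pvBest_none_iff (l : List Int) (t : Int) :
    pvBest l t = none ↔ l.filter (fun x => decide (t < x)) = [] := by
  induction l generalizing t with
  | nil => simp [pvBest]
  | cons x l' ih =>
    by_cases h : t < x
    · simp [pvBest, h]
    · simp [pvBest, h, ih]

theorem pvBest_mem_filter (l : List Int) (t : Int) (M : Int) (k : Nat)
    (h : pvBest l t = some (M, k)) : M ∈ l.filter (fun x => decide (t < x)) := by
  induction l generalizing t M k with
  | nil => simp [pvBest] at h
  | cons x l' ih =>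
    by_cases hx : t < x
    · simp only [pvBest, if_pos hx] at h
      cases hb : pvBest l' x with
      | none => simp [hb] at h; simp [hx, ← h.1]
      | some r =>
        simp [hb] at h
        have := ih x r.1 r.2 (by simp [hb])
        have hM : M = r.1 := by omega
        subst hM
        simp at this
        simp [List.mem_filter] at this ⊢
        exact ⟨Or.inr this.1, by omega⟩
    · simp only [pvBest, if_neg hx] at h
      cases hb : pvBest l' t with
      | none => simp [hb] at h
      | some r =>
        simp [hb] at h
        have := ih t r.1 r.2 (by simp [hb])
        have hM : M = r.1 := by omega
        subst hM
        simp [List.mem_filter] at this ⊢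
        exact ⟨Or.inr this.1, this.2⟩

theorem pvBest_gt (l : List Int) (t : Int) (M : Int) (k : Nat)
    (h : pvBest l t = some (M, k)) : t < M := by
  have := pvBest_mem_filter l t M k h
  simp [List.mem_filter] at this
  exact this.2

theorem pvBest_isMax (l : List Int) (t : Int) (M : Int) (k : Nat)
    (h : pvBest l t = some (M, k)) : ∀ y ∈ l, t < y → y ≤ M := by
  induction l generalizing t M k with
  | nil => simp
  | cons x l' ih =>
    intro y hy hty
    by_cases hx : t < x
    · simp only [pvBest, if_pos hx] at h
      cases hb : pvBest l' x with
      | none =>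
        simp [hb] at h
        -- all of l' strictly above x is empty
        have hemp := (pvBest_none_iff l' x).mp hb
        rcases hy with _ | hy'
        · omega
        · rename_i hy'
          by_cases hxy : x < y
          · exfalso
            have : y ∈ l'.filter (fun z => decide (x < z)) := by
              simp [List.mem_filter]; exact ⟨hy', hxy⟩
            rw [hemp] at this; simp at this
          · omega
      | some r =>
        simp [hb] at h
        have hM : M = r.1 := by omega
        subst hM
        have hxr := pvBest_gt l' x r.1 r.2 (by simp [hb])
        rcases hy with _ | hy'
        · omega
        · rename_i hy'
          by_cases hxy : x < y
          · exact ih x r.1 r.2 (by simp [hb]) y hy' hxy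
          · omega
    · simp only [pvBest, if_neg hx] at h
      cases hb : pvBest l' t with
      | none => simp [hb] at h
      | some r =>
        simp [hb] at h
        have hM : M = r.1 := by omega
        subst hM
        rcases hy with _ | hy'
        · omega
        · rename_i hy'
          exact ih t r.1 r.2 (by simp [hb]) y hy' hty

theorem pvBest_index (l : List Int) (t : Int) (M : Int) (k : Nat)
    (h : pvBest l t = some (M, k)) : PySem.List.index? l M = some k := by
  induction l generalizing t M k with
  | nil => simp [pvBest] at h
  | cons x l' ih =>
    by_cases hx : t < x
    · simp only [pvBest, if_pos hx] at h
      cases hb : pvBest l' x with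
      | none =>
        simp [hb] at h
        have hM : M = x := by omega
        have hk : k = 0 := by omega
        subst hM; subst hk
        exact PySem.List.index?_cons_self ..
      | some r =>
        simp [hb] at h
        have hM : M = r.1 := by omega
        have hk : k = r.2 + 1 := by omega
        subst hM; subst hk
        have hgt := pvBest_gt l' x r.1 r.2 (by simp [hb])
        have hne : x ≠ r.1 := by omega
        rw [PySem.List.index?_cons_of_ne l' hne, ih x r.1 r.2 (by simp [hb])]
        rfl
    · simp only [pvBest, if_neg hx] at h
      cases hb : pvBest l' t with
      | none => simp [hb] at h
      | some r =>
        simp [hb] at h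
        have hM : M = r.1 := by omega
        have hk : k = r.2 + 1 := by omega
        subst hM; subst hk
        have hgt := pvBest_gt l' t r.1 r.2 (by simp [hb])
        have hne : x ≠ r.1 := by omega
        rw [PySem.List.index?_cons_of_ne l' hne, ih t r.1 r.2 (by simp [hb])]
        rfl

-- max? of the filtered list is exactly pvBest's value
theorem pvBest_max? (l : List Int) (t : Int) (M : Int) (k : Nat)
    (h : pvBest l t = some (M, k)) :
    PySem.List.max? (l.filter (fun x => decide (t < x))) (fun x => x) = some M := by
  have hmem := pvBest_mem_filter l t M k h
  have hne : l.filter (fun x => decide (t < x)) ≠ [] := by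
    intro he; rw [he] at hmem; simp at hmem
  cases hm : PySem.List.max? (l.filter (fun x => decide (t < x))) (fun x => x) with
  | none => exact absurd ((PySem.List.max?_eq_none_iff ..).mp hm) hne
  | some m =>
    have h1 : M ≤ m := PySem.List.max?_isMax hm M hmem
    have h2 : m ≤ M := by
      have hmmem := PySem.List.max?_mem hm
      simp [List.mem_filter] at hmmem
      exact pvBest_isMax l t M k h m hmmem.1 hmmem.2
    have : m = M := le_antisymm h2 h1
    rw [this]

-- the loop body of B's fold
def pvStep (acc : Option Int × Option Int) (p : Int × Int) : Option Int × Option Int :=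
  if 0 < p.2 && acc.1.all (fun v => decide (v < p.2)) then (some p.2, some p.1) else acc

-- fold invariant from a positive best value: the fold tracks pvBest
theorem pvFold_some (l : List Int) (n v : Int) (j : Option Int) (hv : 0 < v) :
    (PySem.List.enumerate l n).foldl pvStep (some v, j) =
      match pvBest l v with
      | none => (some v, j)
      | some (M, k) => (some M, some (n + k)) := by
  induction l generalizing n v j with
  | nil => simp [pvBest, PySem.List.enumerate_nil]
  | cons x l' ih =>
    rw [PySem.List.enumerate_cons]
    by_cases hx : v < x
    · have hcond : pvStep (some v, j) (n, x) = (some x, some n) := by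
        simp [pvStep]; omega
      rw [List.foldl_cons, hcond, ih (n + 1) x (some n) (by omega)]
      simp only [pvBest, if_pos hx]
      cases hb : pvBest l' x with
      | none => simp
      | some r => simp; omega
    · have hcond : pvStep (some v, j) (n, x) = (some v, j) := by
        simp [pvStep]; intro h; omega
      rw [List.foldl_cons, hcond, ih (n + 1) v j hv]
      simp only [pvBest, if_neg hx]
      cases hb : pvBest l' v with
      | none => simp
      | some r => simp; omega

theorem pvFold_none (l : List Int) (n : Int) :
    (PySem.List.enumerate l n).foldl pvStep (none, none) =
      match pvBest l 0 with
      | none => (none, none)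
      | some (M, k) => (some M, some (n + k)) := by
  induction l generalizing n with
  | nil => simp [pvBest, PySem.List.enumerate_nil]
  | cons x l' ih =>
    rw [PySem.List.enumerate_cons]
    by_cases hx : (0 : Int) < x
    · have hcond : pvStep (none, none) (n, x) = (some x, some n) := by
        simp [pvStep]; omega
      rw [List.foldl_cons, hcond, pvFold_some l' (n + 1) x (some n) hx]
      simp only [pvBest, if_pos hx]
      cases hb : pvBest l' x with
      | none => simp
      | some r => simp; omega
    · have hcond : pvStep (none, none) (n, x) = (none, none) := by
        simp [pvStep]; omega
      rw [List.foldl_cons, hcond, ih (n + 1)]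
      simp only [pvBest, if_neg hx]
      cases hb : pvBest l' 0 with
      | none => simp
      | some r => simp; omega

theorem alt_eq_pvBest (nums : List Int) :
    find_max_positive_alt nums =
      match pvBest nums 0 with
      | none => none
      | some (_, k) => some ((k : Int)) := by
  unfold find_max_positive_alt
  have : (fun (acc : Option Int × Option Int) (p : Int × Int) =>
      if 0 < p.2 && acc.1.all (fun v => decide (v < p.2)) then (some p.2, some p.1) else acc) = pvStep := by
    funext acc p; rfl
  rw [this, pvFold_none nums 0]
  cases hb : pvBest nums 0 with
  | none => simp
  | some r => simp

-- ===== VERDICT (by name: the statement is the Claim_ definition above) =====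
theorem find_max_positive_spec : Claim_equal_find_max_positive := by
  intro nums _
  unfold Spec_find_max_positive
  rw [alt_eq_pvBest]
  unfold find_max_positive
  cases hb : pvBest nums 0 with
  | none =>
    have hemp := (pvBest_none_iff nums 0).mp hb
    simp [hemp]
  | some r =>
    obtain ⟨M, k⟩ := r
    have hne : nums.filter (fun num => decide (0 < num)) ≠ [] := by
      have := pvBest_mem_filter nums 0 M k hb
      intro he; rw [he] at this; simp at this
    simp only [if_pos hne]
    rw [pvBest_max? nums 0 M k hb]
    have hidx := pvBest_index nums 0 M k hb
    rw [PySem.List.index?_eq_idxOf?] at hidx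
    simp [hidx]
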